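-- pv_equiv track=rewrite | github.com/EgorKunickiy/completed-tasks | main.py | from_16_to_10
-- ===== SOURCE A (Python) =====
-- def from_16_to_10(str):
--     separator = str[4]
--     number_blocks_16 = str.split(separator)
--     number_blocks_10 = []
--     for block in number_blocks_16:
--         sss = 0
--         for iter in block:
--             sss += int(iter, 16)
--         sss = sss.__str__()
--         number_blocks_10.append(sss)
--     return ''.join(number_blocks_10)
-- ===== SOURCE B (Python) =====
-- def from_16_to_10(str):
--     separator = str[4]
--     parts = []
--     running = 0
--     for ch in str:
--         if ch == separator:
--             parts.append('%d' % running)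
--             running = 0
--         else:
--             running += int(ch, 16)
--     parts.append('%d' % running)
--     return ''.join(parts)
-- ===== Notes on version B (the rewrite author's own statement) =====
-- stated objective: simpler
-- what changed: Replaced split-then-nested-loop (build block list, then sum each block) by a single flat scan over the whole string that keeps one running sum, emits it on each separator, and emits the final block after the loop.
import Mathlib
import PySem

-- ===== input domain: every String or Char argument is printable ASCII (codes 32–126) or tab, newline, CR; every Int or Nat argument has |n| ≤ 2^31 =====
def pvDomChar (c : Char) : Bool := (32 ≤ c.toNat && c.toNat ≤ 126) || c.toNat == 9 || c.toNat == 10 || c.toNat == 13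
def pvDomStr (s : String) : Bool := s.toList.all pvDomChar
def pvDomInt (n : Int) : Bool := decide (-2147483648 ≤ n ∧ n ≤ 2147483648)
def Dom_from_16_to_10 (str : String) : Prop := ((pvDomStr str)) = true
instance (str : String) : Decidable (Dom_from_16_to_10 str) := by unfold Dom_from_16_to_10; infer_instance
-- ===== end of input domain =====

-- B replaces split-then-nested-loop by one flat scan that resets the running sum at each
-- separator (objective: simpler, single pass, no intermediate block list).

-- ===== PORT A =====
-- int(c, 16) for the single character c (ValueError → none; Pre_ excludes that)
def hexVal? (c : Char) : Option Int := PySem.Int.ofCharsBase? [c] 16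

def from_16_to_10 (str : String) : String :=
  match PySem.Str.pyGet? str 4 with
  | none => ""                                  -- IndexError; excluded by Pre_
  | some separator =>
    match PySem.Str.split? str (String.ofList [separator]) with
    | none => ""                                -- unreachable: the separator is one char
    | some number_blocks_16 =>
      let number_blocks_10 := number_blocks_16.map (fun block =>
        PySem.Int.toStr (block.toList.foldl (fun sss c => sss + (hexVal? c).getD 0) 0))
      PySem.Str.join "" number_blocks_10

-- ===== PORT B =====
def from_16_to_10_alt (str : String) : String :=
  match PySem.Str.pyGet? str 4 with
  | none => ""                                  -- IndexError; excluded by Pre_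
  | some separator =>
    let st := str.toList.foldl
      (fun (acc : List String × Int) ch =>
        if ch = separator then (acc.1 ++ [PySem.Int.toStr acc.2], 0)
        else (acc.1, acc.2 + (hexVal? ch).getD 0))
      ([], 0)
    PySem.Str.join "" (st.1 ++ [PySem.Int.toStr st.2])

-- ===== PRECONDITION & SPEC =====
-- Pre_ excludes exactly where Python A raises: strings shorter than 5 (IndexError on str[4])
-- and strings containing a non-separator character that is not a hex digit (ValueError in int(c, 16)).
def Pre_from_16_to_10 (str : String) : Prop :=
  4 < str.toList.length ∧
  str.toList.all (fun c =>
    decide (PySem.List.pyGet? str.toList 4 = some c) ||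
    c.isDigit || ('a' ≤ c && c ≤ 'f') || ('A' ≤ c && c ≤ 'F')) = true
instance (str : String) : Decidable (Pre_from_16_to_10 str) := by unfold Pre_from_16_to_10; infer_instance
def pvWitness_from_16_to_10 : String := "12a4,5F,"
def Spec_from_16_to_10 (str : String) (out : String) : Prop := out = from_16_to_10_alt str
instance (str : String) (out : String) : Decidable (Spec_from_16_to_10 str out) := by unfold Spec_from_16_to_10; infer_instance

-- ===== CLAIM (what is proved, stated in full; the proofs are below) =====
def Claim_equal_from_16_to_10 : Prop := ∀ (str : String), Dom_from_16_to_10 str → Pre_from_16_to_10 str → Spec_from_16_to_10 str (from_16_to_10 str)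

-- ===== LEMMAS AND PROOFS =====

-- simple recursion computing splitOn with a single-character separator
def splitC (sep : Char) : List Char → List (List Char)
  | [] => [[]]
  | c :: rest =>
    if c = sep then [] :: splitC sep rest
    else (splitC sep rest).modifyHead (c :: ·)

-- the per-block digit sums of splitC, computed directly with a carried running sum
def sums (sep : Char) (run : Int) : List Char → List Int
  | [] => [run]
  | c :: rest =>
    if c = sep then run :: sums sep 0 rest
    else sums sep (run + (hexVal? c).getD 0) rest

theorem splitC_ne_nil (sep : Char) (l : List Char) : splitC sep l ≠ [] := by
  cases l with
  | nil => simp [splitC]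
  | cons c rest =>
    simp only [splitC]
    split
    · simp
    · cases h : splitC sep rest with
      | nil => exact absurd h (splitC_ne_nil sep rest)
      | cons a t => simp [List.modifyHead]

theorem modifyHead_nil_append (l : List (List Char)) :
    l.modifyHead (fun x => ([] : List Char) ++ x) = l := by
  cases l <;> simp

theorem splitOn_go_eq (sep : Char) (l cur : List Char) (acc : List (List Char))
    (fuel : Nat) (hf : l.length < fuel) :
    PySem.Chars.splitOn.go [sep] fuel l cur acc =
      acc.reverse ++ (splitC sep l).modifyHead (cur.reverse ++ ·) := by
  induction l generalizing fuel cur acc with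
  | nil =>
    cases fuel with
    | zero => omega
    | succ f => simp [PySem.Chars.splitOn.go, splitC, List.modifyHead]
  | cons c rest ih =>
    cases fuel with
    | zero => omega
    | succ f =>
      simp only [List.length_cons] at hf
      simp only [PySem.Chars.splitOn.go]
      by_cases hc : c = sep
      · subst hc
        have hpre : List.isPrefixOf [c] (c :: rest) = true := by
          simp [List.isPrefixOf]
        simp only [hpre, if_true, List.length_nil, List.length_cons,
          List.drop_succ_cons, List.drop_zero]
        rw [ih [] (cur.reverse :: acc) f (by omega)]
        simp [splitC, List.modifyHead]
        cases splitC c rest <;> rfl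
      · have hpre : List.isPrefixOf [sep] (c :: rest) = false := by
          simp [List.isPrefixOf]
          intro h; exact absurd h.symm hc
        simp only [hpre, Bool.false_eq_true, if_false]
        rw [ih (c :: cur) acc f (by omega)]
        simp only [splitC, hc, if_false]
        cases h : splitC sep rest with
        | nil => exact absurd h (splitC_ne_nil sep rest)
        | cons a t => simp [List.modifyHead]

theorem splitOn_single (sep : Char) (l : List Char) :
    PySem.Chars.splitOn l [sep] = splitC sep l := by
  rw [PySem.Chars.splitOn, splitOn_go_eq sep l [] [] (l.length + 1) (by omega)]
  simp only [List.reverse_nil, List.nil_append]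
  exact modifyHead_nil_append _

-- the per-block sums of splitC equal the carried-sum recursion
theorem map_blockSum_splitC (sep : Char) (pre l : List Char) :
    ((splitC sep l).modifyHead (pre ++ ·)).map
        (fun b => b.foldl (fun s c => s + (hexVal? c).getD 0) 0) =
      sums sep (pre.foldl (fun s c => s + (hexVal? c).getD 0) 0) l := by
  induction l generalizing pre with
  | nil => simp [splitC, sums, List.modifyHead]
  | cons c rest ih =>
    simp only [splitC, sums]
    by_cases hc : c = sep
    · simp only [if_pos hc, List.modifyHead_cons, List.map_cons]
      have h0 := ih []
      rw [modifyHead_nil_append] at h0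
      simp only [List.foldl_nil] at h0
      rw [h0, List.append_nil]
    · simp only [if_neg hc]
      cases h : splitC sep rest with
      | nil => exact absurd h (splitC_ne_nil sep rest)
      | cons a t =>
        have h1 := ih (pre ++ [c])
        rw [h] at h1
        simp only [List.modifyHead_cons, List.map_cons, List.foldl_append,
          List.foldl_cons, List.foldl_nil, List.append_assoc,
          List.singleton_append] at h1 ⊢
        exact h1

-- B's fold, flattened: accumulated parts ++ the closing part = the mapped sums
theorem foldl_scan_eq (sep : Char) (l : List Char) (parts : List String) (run : Int) :
    (l.foldl (fun (acc : List String × Int) ch =>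
        if ch = sep then (acc.1 ++ [PySem.Int.toStr acc.2], 0)
        else (acc.1, acc.2 + (hexVal? ch).getD 0)) (parts, run)).1 ++
      [PySem.Int.toStr (l.foldl (fun (acc : List String × Int) ch =>
        if ch = sep then (acc.1 ++ [PySem.Int.toStr acc.2], 0)
        else (acc.1, acc.2 + (hexVal? ch).getD 0)) (parts, run)).2] =
      parts ++ (sums sep run l).map PySem.Int.toStr := by
  induction l generalizing parts run with
  | nil => simp [sums]
  | cons c rest ih =>
    simp only [List.foldl_cons, sums]
    by_cases hc : c = sep
    · simp only [if_pos hc, List.map_cons]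
      rw [ih]
      simp
    · simp only [if_neg hc]
      rw [ih]

theorem from_16_to_10_eq_alt (str : String) : from_16_to_10 str = from_16_to_10_alt str := by
  unfold from_16_to_10 from_16_to_10_alt
  cases hg : PySem.Str.pyGet? str 4 with
  | none => rfl
  | some sep =>
    simp only [PySem.Str.split?, PySem.Chars.split?, String.toList_ofList,
      List.isEmpty_cons, Bool.false_eq_true, if_false, Option.map_some]
    rw [splitOn_single]
    congr 1
    rw [foldl_scan_eq]
    have key := congrArg (List.map PySem.Int.toStr) (map_blockSum_splitC sep [] str.toList)
    rw [modifyHead_nil_append] at key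
    simp only [List.map_map, Function.comp_def, List.foldl_nil] at key
    simp only [List.map_map, Function.comp_def, String.toList_ofList]
    rw [key]
    simp

-- ===== VERDICT (by name: the statement is the Claim_ definition above) =====
theorem from_16_to_10_spec : Claim_equal_from_16_to_10 := by
  intro str _ _
  unfold Spec_from_16_to_10
  exact from_16_to_10_eq_alt str
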